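-- pv_equiv track=rewrite | github.com/fhill2/cm3065_final | ex2/cm3065/exercise2.py | rice_decode_all
-- ===== SOURCE A (Python) =====
-- def rice_decode_all(bits: str, k: int) -> list[int]:
--     m = 2 ** k
--     results = []
--     idx = 0
--     n = len(bits)
--
--     while idx < n:
--         # Find the unary code: number of 1s before the first 0 starting at idx
--         q = 0
--         while idx + q < n and bits[idx + q] == '1':
--             q += 1
--
--         # The next bit must be zero (delimiter)
--         if idx + q >= n or bits[idx + q] != '0':
--             raise ValueError("Invalid encoding: unary code not properly terminated")
--
--         # Start of remainder bits
--         start_r = idx + q + 1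
--         end_r = start_r + k
--
--         if end_r > n:
--             raise ValueError("Invalid encoding: remainder bits incomplete")
--
--         r_bits = bits[start_r:end_r]
--         r = int(r_bits, 2) if r_bits else 0
--
--         s = q * m + r
--         results.append(s)
--
--         # Move index past this integer's bits: unary(q 1's + 0) + k remainder bits
--         idx = end_r
--
--     return results
-- ===== SOURCE B (Python) =====
-- def rice_decode_all(bits: str, k: int) -> list[int]:
--     # Single left-to-right scan driven by a two-state machine (unary / remainder),
--     # instead of index jumps with slicing and int(..., 2).
--     m = 2 ** k
--     results = []
--     q = 0          # count of unary 1s in the current code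
--     r = 0          # remainder value being shifted in
--     rem = 0        # remainder bits still to read
--     in_rem = False
--     for c in bits:
--         if not in_rem:
--             if c == '1':
--                 q += 1
--             elif c == '0':
--                 if k == 0:
--                     results.append(q * m)
--                     q = 0
--                 else:
--                     in_rem = True
--                     rem = k
--                     r = 0
--             else:
--                 raise ValueError("Invalid encoding: unary code not properly terminated")
--         else:
--             if c == '0':
--                 r = 2 * r
--             elif c == '1':
--                 r = 2 * r + 1
--             else:
--                 raise ValueError("Invalid encoding: remainder bits incomplete")
--             rem -= 1
--             if rem == 0:
--                 results.append(q * m + r)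
--                 q = 0
--                 in_rem = False
--     if in_rem:
--         raise ValueError("Invalid encoding: remainder bits incomplete")
--     if q > 0:
--         raise ValueError("Invalid encoding: unary code not properly terminated")
--     return results
-- ===== Notes on version B (the rewrite author's own statement) =====
-- stated objective: alternative
-- what changed: Replaced A's index-jumping parser (inner unary scan, slice of the remainder field, int(r_bits,2)) with a single flat left-to-right scan over the characters driven by a unary/remainder state machine that shifts remainder bits into a running value.
-- outside the precondition, e.g. on rice_decode_all('01_0', 3): A returns [2], B raises ValueError
import Mathlib
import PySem

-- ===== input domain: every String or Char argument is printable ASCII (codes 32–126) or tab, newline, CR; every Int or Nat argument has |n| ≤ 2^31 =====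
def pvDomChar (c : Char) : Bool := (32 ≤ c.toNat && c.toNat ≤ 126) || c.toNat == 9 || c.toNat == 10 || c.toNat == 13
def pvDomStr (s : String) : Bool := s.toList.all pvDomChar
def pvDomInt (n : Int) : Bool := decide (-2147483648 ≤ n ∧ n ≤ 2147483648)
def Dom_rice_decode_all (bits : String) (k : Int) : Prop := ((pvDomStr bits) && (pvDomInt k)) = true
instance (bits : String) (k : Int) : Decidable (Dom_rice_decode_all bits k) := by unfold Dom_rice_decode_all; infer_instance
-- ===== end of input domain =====

-- B replaces A's index-jumping parser (inner unary scan, slice, int(r_bits, 2)) by a single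
-- flat character scan driven by a unary/remainder state machine; same cost, different structure.

-- ===== PORT A =====
-- port of `int(r_bits, 2)`: exact on strings of '0'/'1' (the only remainder fields Pre_ admits)
def pvBinValA (cs : List Char) : Int := cs.foldl (fun a c => 2 * a + (if c == '1' then 1 else 0)) 0

-- A's while-loop; fuel-driven (fuel = n+1 suffices when k ≥ 0, the only case Pre_ admits);
-- none = ValueError (or fuel exhausted, unreachable under Pre_).  idx is kept as Nat: Python's
-- idx stays nonnegative whenever k ≥ 0, so .toNat at the update is exact there.  The all-binary
-- guard marks where Python's int(r_bits, 2) raises; Pre_ admits only pure '0'/'1' fields.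
def pvRiceLoopA (l : List Char) (k m : Int) : Nat → Nat → List Int → Option (List Int)
  | 0, _, _ => none
  | fuel + 1, idx, results =>
    if idx < l.length then
      -- inner while: count the 1s starting at idx
      let q := ((l.drop idx).takeWhile (· == '1')).length
      if idx + q ≥ l.length then none          -- "unary code not properly terminated"
      else if l.getD (idx + q) ' ' ≠ '0' then none
      else
        let start_r := idx + q + 1
        let end_r : Int := (start_r : Int) + k
        if end_r > (l.length : Int) then none  -- "remainder bits incomplete"
        else
          let r_bits := PySem.List.slice l (some (start_r : Int)) (some end_r)
          if r_bits.all (fun c => c == '0' || c == '1') then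
            let r : Int := if r_bits.isEmpty then 0 else pvBinValA r_bits
            pvRiceLoopA l k m fuel end_r.toNat (results ++ [(q : Int) * m + r])
          else none
    else some results

def rice_decode_all (bits : String) (k : Int) : List Int :=
  let m : Int := 2 ^ k.toNat   -- Python 2 ** k; exact for k ≥ 0 (the only case Pre_ admits)
  (pvRiceLoopA bits.toList k m (bits.toList.length + 1) 0 []).getD []

-- ===== PORT B =====
-- one step of the state machine; state = (results, q, r, rem, in_rem); none = ValueError
def pvStepB (k m : Int) (st : List Int × Int × Int × Int × Bool) (c : Char) :
    Option (List Int × Int × Int × Int × Bool) :=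
  let (results, q, r, rem, inRem) := st
  if !inRem then
    if c == '1' then some (results, q + 1, r, rem, false)
    else if c == '0' then
      if k == 0 then some (results ++ [q * m], 0, r, rem, false)
      else some (results, q, 0, k, true)
    else none
  else
    match (if c == '0' then some (2 * r) else if c == '1' then some (2 * r + 1) else none) with
    | none => none
    | some r' =>
      let rem' := rem - 1
      if rem' == 0 then some (results ++ [q * m + r'], 0, r', rem', false)
      else some (results, q, r', rem', true)

def pvFoldB (k m : Int) (cs : List Char) : Option (List Int × Int × Int × Int × Bool) :=
  cs.foldl (fun o c => o.bind (fun st => pvStepB k m st c)) (some ([], 0, 0, 0, false))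

def rice_decode_all_alt (bits : String) (k : Int) : List Int :=
  let m : Int := 2 ^ k.toNat   -- Python 2 ** k; exact for k ≥ 0 (the only case Pre_ admits)
  match pvFoldB k m bits.toList with
  | none => []
  | some (results, q, _, _, inRem) =>
    if inRem then []            -- "remainder bits incomplete"
    else if q > 0 then []       -- "unary code not properly terminated"
    else results

-- ===== PRECONDITION & SPEC =====
-- acceptor for the Rice-code language (1^q 0 b^k)* with b ∈ {'0','1'}:
-- pending = inside a run of 1s, rem = remainder bits still owed (0 = at the unary part)
def pvRiceOk (k : Nat) : List Char → Bool → Nat → Bool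
  | [], pending, rem => !pending && rem == 0
  | c :: w, pending, 0 =>
      if c = '1' then pvRiceOk k w true 0
      else if c = '0' then pvRiceOk k w false k
      else false
  | c :: w, pending, j + 1 =>
      if c = '0' ∨ c = '1' then pvRiceOk k w pending j else false

-- Pre_: `bits` is a well-formed concatenation of Rice codes with k ≥ 0 (or is empty).
-- Pre_ excludes: k < 0 with nonempty bits (A returns non-int floats or diverges there); bits
-- outside the Rice-code language (A raises ValueError); remainder fields that are not pure
-- '0'/'1' strings — on those A's int(r_bits, 2) is leniently permissive (underscores, sign,
-- whitespace, 'b') and can still return, while B raises; see the cite in claim.json.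
def Pre_rice_decode_all (bits : String) (k : Int) : Prop :=
  bits.toList = [] ∨ (0 ≤ k ∧ pvRiceOk k.toNat bits.toList false 0 = true)
instance (bits : String) (k : Int) : Decidable (Pre_rice_decode_all bits k) := by
  unfold Pre_rice_decode_all; infer_instance

def pvWitness_rice_decode_all : String × Int := ("1101", 1)

def Spec_rice_decode_all (bits : String) (k : Int) (out : List Int) : Prop :=
  out = rice_decode_all_alt bits k
instance (bits : String) (k : Int) (out : List Int) : Decidable (Spec_rice_decode_all bits k out) := by
  unfold Spec_rice_decode_all; infer_instance

-- ===== CLAIM =====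
def Claim_equal_rice_decode_all : Prop :=
  ∀ (bits : String) (k : Int), Dom_rice_decode_all bits k → Pre_rice_decode_all bits k →
    Spec_rice_decode_all bits k (rice_decode_all bits k)

-- ===== LEMMAS AND PROOFS =====

-- accepted strings split off a leading code 1^q 0 …
theorem pvPeelUnary (k : Nat) :
    ∀ (cs : List Char) (pending : Bool), pvRiceOk k cs pending 0 = true →
      (cs = [] ∧ pending = false) ∨
        ∃ q rest, cs = List.replicate q '1' ++ '0' :: rest ∧ pvRiceOk k rest false k = true := by
  intro cs
  induction cs with
  | nil =>
    intro pending h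
    rw [pvRiceOk] at h
    left
    exact ⟨rfl, by simpa using h⟩
  | cons c w ih =>
    intro pending h
    by_cases h1 : c = '1'
    · subst h1
      rw [pvRiceOk, if_pos rfl] at h
      rcases ih true h with ⟨_, hpend⟩ | ⟨q, rest, hw, hrest⟩
      · exact absurd hpend (by simp)
      · right; exact ⟨q + 1, rest, by rw [hw, List.replicate_succ]; rfl, hrest⟩
    · by_cases h0 : c = '0'
      · subst h0
        rw [pvRiceOk, if_neg (by decide), if_pos rfl] at h
        right; exact ⟨0, w, by simp, h⟩
      · rw [pvRiceOk, if_neg h1, if_neg h0] at h; exact absurd h (by simp)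

-- in remainder state j, exactly j binary chars are consumed before returning to the boundary
theorem pvPeelRem (k : Nat) :
    ∀ (j : Nat) (cs : List Char), pvRiceOk k cs false j = true →
      ∃ ds rest, cs = ds ++ rest ∧ ds.length = j ∧ (∀ c ∈ ds, c = '0' ∨ c = '1') ∧
        pvRiceOk k rest false 0 = true := by
  intro j
  induction j with
  | zero => intro cs h; exact ⟨[], cs, by simp, rfl, by simp, h⟩
  | succ j ih =>
    intro cs h
    cases cs with
    | nil => rw [pvRiceOk] at h; simp at h
    | cons c w =>
      rw [pvRiceOk] at h
      by_cases hc : c = '0' ∨ c = '1'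
      · rw [if_pos hc] at h
        obtain ⟨ds, rest, hw, hlen, hbin, hrest⟩ := ih w h
        exact ⟨c :: ds, rest, by rw [hw]; rfl, by simp [hlen],
          fun d hd => by
            rcases List.mem_cons.mp hd with h | h
            · exact h ▸ hc
            · exact hbin d h,
          hrest⟩
      · rw [if_neg hc] at h; exact absurd h (by simp)

theorem pvTakeWhileOnes (q : Nat) (rest : List Char) :
    (List.replicate q '1' ++ '0' :: rest).takeWhile (· == '1') = List.replicate q '1' := by
  induction q with
  | zero => simp [List.takeWhile]
  | succ n ih => rw [List.replicate_succ]; simpa [List.takeWhile] using ih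

-- B: fold over a run of 1s in unary state just counts
theorem pvFoldB_ones (k m : Int) (a : Nat) :
    ∀ (res : List Int) (q r rem : Int),
      List.foldl (fun o c => o.bind (fun st => pvStepB k m st c))
        (some (res, q, r, rem, false)) (List.replicate a '1')
      = some (res, q + (a : Int), r, rem, false) := by
  induction a with
  | zero => intro res q r rem; simp
  | succ n ih =>
    intro res q r rem
    rw [List.replicate_succ]
    simp only [List.foldl_cons, Option.bind_some]
    have : pvStepB k m (res, q, r, rem, false) '1' = some (res, q + 1, r, rem, false) := by
      simp [pvStepB]
    rw [this, ih]
    push_cast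
    ring_nf

-- B: fold over the remainder field shifts bits in and appends at countdown 0
theorem pvFoldB_rem (k m : Int) :
    ∀ (ds : List Char), ds ≠ [] →
      (∀ c ∈ ds, c = '0' ∨ c = '1') →
      ∀ (res : List Int) (q r : Int),
        List.foldl (fun o c => o.bind (fun st => pvStepB k m st c))
          (some (res, q, r, (ds.length : Int), true)) ds
        = some (res ++ [q * m + ds.foldl (fun a c => 2 * a + (if c == '1' then 1 else 0)) r],
                0, ds.foldl (fun a c => 2 * a + (if c == '1' then 1 else 0)) r, 0, false) := by
  intro ds
  induction ds with
  | nil => intro h; exact absurd rfl h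
  | cons d ds' ih =>
    intro _ hbin res q r
    have hd : d = '0' ∨ d = '1' := hbin d (List.mem_cons_self ..)
    have hstep : pvStepB k m (res, q, r, ((d :: ds').length : Int), true) d
        = (if ((d :: ds').length : Int) - 1 == 0
           then some (res ++ [q * m + (2 * r + (if d == '1' then 1 else 0))], 0,
                      2 * r + (if d == '1' then 1 else 0), ((d :: ds').length : Int) - 1, false)
           else some (res, q, 2 * r + (if d == '1' then 1 else 0), ((d :: ds').length : Int) - 1, true)) := by
      rcases hd with h | h <;> subst h <;> simp [pvStepB]
    cases ds' with
    | nil =>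
      simp only [List.foldl_cons, Option.bind_some, hstep]
      norm_num
    | cons e es =>
      simp only [List.foldl_cons, Option.bind_some, hstep]
      have hne : ((d :: e :: es).length : Int) - 1 ≠ 0 := by
        simp only [List.length_cons]; push_cast; omega
      rw [if_neg (by simpa using hne)]
      have : ((d :: e :: es).length : Int) - 1 = ((e :: es).length : Int) := by
        simp only [List.length_cons]; push_cast; ring
      rw [this]
      have := ih (by simp) (fun c hc => hbin c (List.mem_cons_of_mem _ hc)) res q
        (2 * r + (if d == '1' then 1 else 0))
      simpa using this

-- main parallel induction: on accepted suffixes both machines produce the same decoded block list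
theorem pvMain (kn : Nat) :
    ∀ (n : Nat) (l : List Char) (idx : Nat) (acc res : List Int) (r0 rem0 : Int) (fuel : Nat),
      pvRiceOk kn (l.drop idx) false 0 = true →
      idx ≤ l.length → l.length - idx ≤ n → l.length - idx + 1 ≤ fuel →
      ∃ t r' rem',
        pvRiceLoopA l (kn : Int) (2 ^ kn) fuel idx acc = some (acc ++ t) ∧
        List.foldl (fun o c => o.bind (fun st => pvStepB (kn : Int) (2 ^ kn) st c))
          (some (res, 0, r0, rem0, false)) (l.drop idx)
          = some (res ++ t, 0, r', rem', false) := by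
  intro n
  induction n with
  | zero =>
    intro l idx acc res r0 rem0 fuel hok hle hn hfuel
    have hnil : l.drop idx = [] := by
      have h0 : (l.drop idx).length = 0 := by
        rw [List.length_drop]; omega
      exact List.eq_nil_of_length_eq_zero h0
    cases fuel with
    | zero => omega
    | succ f =>
      refine ⟨[], r0, rem0, ?_, ?_⟩
      · simp only [pvRiceLoopA]
        rw [if_neg (by omega : ¬ idx < l.length)]
        simp
      · rw [hnil]; simp
  | succ n ihn =>
    intro l idx acc res r0 rem0 fuel hok hle hn hfuel
    rcases pvPeelUnary kn (l.drop idx) false hok with ⟨hnil, _⟩ | ⟨q, rest, hcs, hrest⟩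
    · -- clean end of input
      cases fuel with
      | zero => omega
      | succ f =>
        refine ⟨[], r0, rem0, ?_, ?_⟩
        · have hlen : (l.drop idx).length = 0 := by rw [hnil]; rfl
          rw [List.length_drop] at hlen
          simp only [pvRiceLoopA]
          rw [if_neg (by omega : ¬ idx < l.length)]
          simp
        · rw [hnil]; simp
    · -- one full code 1^q 0 ds, then an accepted rest'
      obtain ⟨ds, rest', hsplit, hdl, hbin, hok'⟩ := pvPeelRem kn kn rest hrest
      rw [hsplit] at hcs
      have hL : l.length = idx + q + 1 + kn + rest'.length := by
        have := congrArg List.length hcs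
        simp [List.length_drop] at this
        omega
      have hidxlt : idx < l.length := by omega
      have htw : ((l.drop idx).takeWhile (· == '1')).length = q := by
        rw [hcs, pvTakeWhileOnes, List.length_replicate]
      have hd2 : l.drop (idx + q) = '0' :: (ds ++ rest') := by
        have h1 : l.drop (idx + q) = (l.drop idx).drop q := by
          rw [List.drop_drop, Nat.add_comm]
        rw [h1, hcs]
        simpa using List.drop_left (List.replicate q '1') ('0' :: (ds ++ rest'))
      have hgd : l[idx + q]? = some '0' := by
        have h2 : (l.drop (idx + q))[0]? = l[idx + q + 0]? := List.getElem?_drop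
        rw [hd2] at h2
        simpa using h2.symm
      have hd3 : l.drop (idx + q + 1) = ds ++ rest' := by
        have h1 : l.drop (idx + q + 1) = (l.drop (idx + q)).drop 1 := by
          rw [List.drop_drop, Nat.add_comm]
        rw [h1, hd2, List.drop_one, List.tail_cons]
      have hslice : (ds ++ rest').take kn = ds := by
        rw [← hdl]; exact List.take_left ..
      have hall : ds.all (fun c => c == '0' || c == '1') = true := by
        rw [List.all_eq_true]
        intro c hc
        rcases hbin c hc with h | h <;> simp [h]
      have hifr : (if (ds).isEmpty then (0 : Int) else pvBinValA ds) = pvBinValA ds := by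
        cases ds <;> simp [pvBinValA]
      have htoNat : (((idx + q + 1 : Nat) : Int) + (kn : Int)).toNat = idx + q + 1 + kn := by
        push_cast
        omega
      have hd4 : l.drop (idx + q + 1 + kn) = rest' := by
        have h1 : l.drop (idx + q + 1 + kn) = (l.drop (idx + q + 1)).drop kn := by
          rw [List.drop_drop, Nat.add_comm]
        rw [h1, hd3, ← hdl, List.drop_left]
      cases fuel with
      | zero => omega
      | succ f =>
        -- the element this block decodes
        set e : Int := (q : Int) * 2 ^ kn + pvBinValA ds with he
        by_cases hk0 : kn = 0
        · -- k = 0: ds = [], B appends immediately on the delimiter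
          subst hk0
          have hds : ds = [] := List.eq_nil_of_length_eq_zero hdl
          subst hds
          obtain ⟨t, r', rem', hA, hB⟩ :=
            ihn l (idx + q + 1 + 0) (acc ++ [e]) (res ++ [(q : Int) * 2 ^ 0]) r0 rem0 f
              (by rw [hd4]; exact hok') (by omega) (by omega) (by omega)
          refine ⟨e :: t, r', rem', ?_, ?_⟩
          · simp only [pvRiceLoopA]
            rw [if_pos hidxlt, htw]
            rw [if_neg (by omega : ¬ idx + q ≥ l.length)]
            rw [if_neg (by simp [List.getD_eq_getElem?_getD, hgd] : ¬ l.getD (idx + q) ' ' ≠ '0')]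
            rw [if_neg (by push_cast; omega :
              ¬ ((idx + q + 1 : Nat) : Int) + ((0 : Nat) : Int) > (l.length : Int))]
            rw [PySem.List.slice_natCast_add, hd3, hslice]
            rw [if_pos hall, hifr, htoNat, hA]
            simp
          · rw [hcs, List.foldl_append, pvFoldB_ones]
            simp only [zero_add, List.foldl_cons, Option.bind_some]
            have hstep : pvStepB ((0 : Nat) : Int) (2 ^ (0 : Nat))
                (res, (q : Int), r0, rem0, false) '0'
                = some (res ++ [(q : Int) * 2 ^ (0 : Nat)], 0, r0, rem0, false) := by
              simp [pvStepB]
            rw [hstep]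
            simp only [List.nil_append]
            rw [hd4] at hB
            rw [hB]
            have : e = (q : Int) * 2 ^ (0 : Nat) := by simp [he, pvBinValA]
            rw [this]
            simp
        · -- k > 0: B enters remainder state and shifts kn bits in
          have hdsne : ds ≠ [] := by
            intro h
            rw [h] at hdl
            simp at hdl
            omega
          obtain ⟨t, r', rem', hA, hB⟩ :=
            ihn l (idx + q + 1 + kn) (acc ++ [e]) (res ++ [e])
              (ds.foldl (fun a c => 2 * a + (if c == '1' then 1 else 0)) 0) 0 f
              (by rw [hd4]; exact hok') (by omega) (by omega) (by omega)
          refine ⟨e :: t, r', rem', ?_, ?_⟩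
          · simp only [pvRiceLoopA]
            rw [if_pos hidxlt, htw]
            rw [if_neg (by omega : ¬ idx + q ≥ l.length)]
            rw [if_neg (by simp [List.getD_eq_getElem?_getD, hgd] : ¬ l.getD (idx + q) ' ' ≠ '0')]
            rw [if_neg (by push_cast; omega :
              ¬ ((idx + q + 1 : Nat) : Int) + ((kn : Nat) : Int) > (l.length : Int))]
            rw [PySem.List.slice_natCast_add, hd3, hslice]
            rw [if_pos hall, hifr, htoNat, hA]
            simp
          · rw [hcs, List.foldl_append, pvFoldB_ones]
            simp only [zero_add, List.foldl_cons, Option.bind_some]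
            have hstep : pvStepB ((kn : Nat) : Int) (2 ^ kn)
                (res, (q : Int), r0, rem0, false) '0'
                = some (res, (q : Int), 0, ((kn : Nat) : Int), true) := by
              have : ¬ (((kn : Nat) : Int) == 0) = true := by
                simp
                omega
              simp [pvStepB, this]
            rw [hstep, List.foldl_append]
            rw [hd4] at hB
            rw [← hdl] at hB ⊢
            have hrem := pvFoldB_rem ((ds.length : Nat) : Int) (2 ^ ds.length) ds hdsne hbin
              res (q : Int) 0
            rw [hrem]
            have hval : (q : Int) * 2 ^ ds.length
                + ds.foldl (fun a c => 2 * a + (if c == '1' then 1 else 0)) 0 = e := by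
              rw [he, hdl]
              rfl
            rw [hval, hB]
            simp

-- ===== VERDICT =====
theorem rice_decode_all_spec : Claim_equal_rice_decode_all := by
  intro bits k _ hpre
  show rice_decode_all bits k = rice_decode_all_alt bits k
  rcases hpre with hnil | ⟨hk, hok⟩
  · simp [rice_decode_all, rice_decode_all_alt, pvFoldB, pvRiceLoopA, hnil]
  · have hky : k = ((k.toNat : Nat) : Int) := (Int.toNat_of_nonneg hk).symm
    obtain ⟨t, r', rem', hA, hB⟩ :=
      pvMain k.toNat bits.toList.length bits.toList 0 [] [] 0 0 (bits.toList.length + 1)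
        (by simpa using hok) (by simp) (by simp) (by omega)
    simp only [rice_decode_all, rice_decode_all_alt, pvFoldB]
    rw [hky]
    simp only [Int.toNat_natCast]
    rw [hA]
    rw [List.drop_zero] at hB
    rw [hB]
    simp
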